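-- pv_equiv track=rewrite | github.com/GureumKim/Practice-CodingTest | 프로그래머스/1/42840. 모의고사/모의고사.py | solution
-- ===== SOURCE A (Python) =====
-- def solution(answers):
--     def score_idiot1():
--         score = 0
--         for no in range(len(answers)):
--             if no % 5 + 1 == answers[no]:
--                 score += 1
--         return score
--     def score_idiot2():
--         score = 0
--         even_pick = 2
--         odd_pick = [1, 3, 4, 5]
--         odd_idx = 0
--         for no in range(0, len(answers), 2):
--             if even_pick == answers[no]:
--                 score += 1
--
--         for no in range(1, len(answers), 2):
--             if odd_pick[odd_idx % 4] == answers[no]: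
--                 score += 1
--             odd_idx += 1
--
--         return score
--
--     def score_idiot3():
--         score = 0
--         pick = [3, 1, 2, 4, 5]
--         even_idx, odd_idx = 0, 0
--         for no in range(0, len(answers), 2):
--             if pick[even_idx % 5] == answers[no]:
--                 score += 1
--             even_idx += 1
--         for no in range(1, len(answers), 2):
--             if pick[odd_idx % 5] == answers[no]:
--                 score += 1
--             odd_idx += 1
--
--         return score
--
--
--     answer = []
--     scores = [0] * 4
--     scores[1] = score_idiot1()
--     scores[2] = score_idiot2()
--     scores[3] = score_idiot3()
--
--     mx = 0
--     for st_no in range(1, 4):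
--         if mx == scores[st_no]:
--             answer.append(st_no)
--         elif mx < scores[st_no]:
--             answer = []
--             mx = scores[st_no]
--             answer.append(st_no)
--
--
--     return answer
-- ===== SOURCE B (Python) =====
-- def solution(answers):
--     p1 = [1, 2, 3, 4, 5]
--     p2 = [2, 1, 2, 3, 2, 4, 2, 5]
--     p3 = [3, 3, 1, 1, 2, 2, 4, 4, 5, 5]
--     s1 = s2 = s3 = 0
--     for i, a in enumerate(answers):
--         if a == p1[i % 5]:
--             s1 += 1
--         if a == p2[i % 8]:
--             s2 += 1
--         if a == p3[i % 10]:
--             s3 += 1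
--     mx = max(s1, s2, s3)
--     return [k for k, s in ((1, s1), (2, s2), (3, s3)) if s == mx]
-- ===== Notes on version B (the rewrite author's own statement) =====
-- stated objective: simpler
-- what changed: Replaces A's five index-loops (one per-person plus separate even/odd passes with modulo counters) and its running-max/reset selection loop by one fused pass over enumerate(answers) against three explicit cyclic answer patterns, followed by max() and a comprehension.
import Mathlib
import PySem

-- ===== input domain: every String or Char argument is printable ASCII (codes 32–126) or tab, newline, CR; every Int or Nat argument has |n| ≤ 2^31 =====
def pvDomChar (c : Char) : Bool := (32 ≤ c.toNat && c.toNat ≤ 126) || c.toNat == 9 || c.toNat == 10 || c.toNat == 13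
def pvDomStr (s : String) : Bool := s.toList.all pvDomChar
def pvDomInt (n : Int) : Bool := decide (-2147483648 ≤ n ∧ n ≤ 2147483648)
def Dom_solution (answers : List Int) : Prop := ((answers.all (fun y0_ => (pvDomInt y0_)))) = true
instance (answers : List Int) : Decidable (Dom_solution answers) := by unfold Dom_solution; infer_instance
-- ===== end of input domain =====

-- B replaces A's five per-person index loops and its running-max/reset selection loop by one
-- fused pass over enumerate(answers) against three explicit cyclic patterns, then max + filter (objective: simpler).

-- ===== PORT A =====
def solution (answers : List Int) : List Int :=
  let n : Int := PySem.List.len answers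
  let score1 : Int :=
    (PySem.List.pyRange 0 n 1).foldl (fun score no =>
      if PySem.Int.mod no 5 + 1 == PySem.List.pyGetD answers no 0 then score + 1 else score) 0
  let score2 : Int :=
    let evenPick : Int := 2
    let oddPick : List Int := [1, 3, 4, 5]
    let s := (PySem.List.pyRange 0 n 2).foldl (fun score no =>
      if evenPick == PySem.List.pyGetD answers no 0 then score + 1 else score) 0
    ((PySem.List.pyRange 1 n 2).foldl (fun (p : Int × Int) no =>
      ((if PySem.List.pyGetD oddPick (PySem.Int.mod p.2 4) 0 == PySem.List.pyGetD answers no 0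
          then p.1 + 1 else p.1), p.2 + 1)) (s, 0)).1
  let score3 : Int :=
    let pick : List Int := [3, 1, 2, 4, 5]
    let s := ((PySem.List.pyRange 0 n 2).foldl (fun (p : Int × Int) no =>
      ((if PySem.List.pyGetD pick (PySem.Int.mod p.2 5) 0 == PySem.List.pyGetD answers no 0
          then p.1 + 1 else p.1), p.2 + 1)) (0, 0)).1
    ((PySem.List.pyRange 1 n 2).foldl (fun (p : Int × Int) no =>
      ((if PySem.List.pyGetD pick (PySem.Int.mod p.2 5) 0 == PySem.List.pyGetD answers no 0
          then p.1 + 1 else p.1), p.2 + 1)) (s, 0)).1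
  let scores : List Int := [0, score1, score2, score3]
  let r := (PySem.List.pyRange 1 4 1).foldl (fun (p : List Int × Int) stNo =>
      if p.2 == PySem.List.pyGetD scores stNo 0 then (p.1 ++ [stNo], p.2)
      else if p.2 < PySem.List.pyGetD scores stNo 0 then ([stNo], PySem.List.pyGetD scores stNo 0)
      else p) ([], 0)
  r.1

-- ===== PORT B =====
def solution_alt (answers : List Int) : List Int :=
  let p1 : List Int := [1, 2, 3, 4, 5]
  let p2 : List Int := [2, 1, 2, 3, 2, 4, 2, 5]
  let p3 : List Int := [3, 3, 1, 1, 2, 2, 4, 4, 5, 5]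
  let s := (PySem.List.enumerate answers).foldl (fun (s : Int × Int × Int) ia =>
      ((if ia.2 == PySem.List.pyGetD p1 (PySem.Int.mod ia.1 5) 0 then s.1 + 1 else s.1),
       (if ia.2 == PySem.List.pyGetD p2 (PySem.Int.mod ia.1 8) 0 then s.2.1 + 1 else s.2.1),
       (if ia.2 == PySem.List.pyGetD p3 (PySem.Int.mod ia.1 10) 0 then s.2.2 + 1 else s.2.2)))
    (0, 0, 0)
  let mx : Int := max s.1 (max s.2.1 s.2.2)
  ([((1 : Int), s.1), (2, s.2.1), (3, s.2.2)].filter (fun ks => ks.2 == mx)).map (fun ks => ks.1)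

-- ===== PRECONDITION & SPEC =====
def Spec_solution (answers : List Int) (out : List Int) : Prop := out = solution_alt answers
instance (answers : List Int) (out : List Int) : Decidable (Spec_solution answers out) := by unfold Spec_solution; infer_instance

-- ===== CLAIM (what is proved, stated in full; the proofs are below) =====
def Claim_equal_solution : Prop := ∀ (answers : List Int), Dom_solution answers → Spec_solution answers (solution answers)

-- ===== LEMMAS AND PROOFS =====

-- A fold that also carries a running index counter, over List.range, counts matches.
theorem pv_counter_fold (g : Int → Int → Bool) (f : Nat → Int) (s0 : Int) (m : Nat) :
    (List.range m).foldl
        (fun (p : Int × Int) (y : Nat) => ((if g p.2 (f y) then p.1 + 1 else p.1), p.2 + 1)) (s0, 0)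
    = (s0 + (((List.range m).countP (fun k : Nat => g (k : Int) (f k))) : Int), (m : Int)) := by
  induction m with
  | zero => simp
  | succ m ih =>
    rw [List.range_succ, List.foldl_append, ih, List.countP_append]
    simp [List.countP_cons]
    split_ifs with h <;> ring

-- range(0, N, 2) and range(1, N, 2) as mapped Nat ranges
theorem pv_pyRange_even (N : Nat) :
    PySem.List.pyRange 0 (N : Int) 2 = (List.range (N - N / 2)).map (fun k : Nat => 2 * (k : Int)) := by
  rw [PySem.List.pyRange_of_pos _ _ (by norm_num)]
  have h : (if (0 : Int) < (N : Int) then (((N : Int) - 0 + 2 - 1) / 2).toNat else 0) = N - N / 2 := by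
    split_ifs with h
    · have h2 : ((N : Int) - 0 + 2 - 1) = ((N + 1 : Nat) : Int) := by push_cast; ring
      rw [h2, show ((2 : Int)) = ((2 : Nat) : Int) from rfl, ← Int.natCast_div, Int.toNat_natCast]
      omega
    · omega
  rw [h]
  apply List.map_congr_left
  intro k _
  ring

theorem pv_pyRange_odd (N : Nat) :
    PySem.List.pyRange 1 (N : Int) 2 = (List.range (N / 2)).map (fun k : Nat => 2 * (k : Int) + 1) := by
  rw [PySem.List.pyRange_of_pos _ _ (by norm_num)]
  have h : (if (1 : Int) < (N : Int) then (((N : Int) - 1 + 2 - 1) / 2).toNat else 0) = N / 2 := by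
    split_ifs with h
    · have h2 : ((N : Int) - 1 + 2 - 1) = ((N : Nat) : Int) := by ring
      rw [h2, show ((2 : Int)) = ((2 : Nat) : Int) from rfl, ← Int.natCast_div, Int.toNat_natCast]
    · omega
  rw [h]
  apply List.map_congr_left
  intro k _
  ring

-- splitting a count over range N into even and odd positions
theorem pv_countP_range_split (q : Nat → Bool) (N : Nat) :
    (List.range N).countP q
      = (List.range (N - N / 2)).countP (fun j => q (2 * j))
        + (List.range (N / 2)).countP (fun j => q (2 * j + 1)) := by
  have hperm : (((List.range (N - N / 2)).map (fun j => 2 * j))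
      ++ ((List.range (N / 2)).map (fun j => 2 * j + 1))).Perm (List.range N) := by
    rw [List.perm_ext_iff_of_nodup]
    · intro a
      simp only [List.mem_append, List.mem_map, List.mem_range]
      constructor
      · rintro (⟨j, hj, rfl⟩ | ⟨j, hj, rfl⟩) <;> omega
      · intro ha
        rcases Nat.even_or_odd a with ⟨j, hj⟩ | ⟨j, hj⟩
        · exact Or.inl ⟨j, by omega, by omega⟩
        · exact Or.inr ⟨j, by omega, by omega⟩
    · apply List.Nodup.append
      · exact List.nodup_range.map (fun a b h => by omega)
      · exact List.nodup_range.map (fun a b h => by omega)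
      · intro a ha hb
        simp only [List.mem_map, List.mem_range] at ha hb
        obtain ⟨j, _, rfl⟩ := ha
        obtain ⟨j', _, h⟩ := hb
        omega
    · exact List.nodup_range
  rw [← hperm.countP_eq, List.countP_append, List.countP_map, List.countP_map]
  rfl

-- person 1: A's predicate equals B's pattern predicate
theorem pv_cnt1 (l : List Int) :
    (List.range l.length).countP
        (fun k : Nat => (PySem.Int.mod (k : Int) 5 + 1 == PySem.List.pyGetD l (k : Int) 0))
      = (List.range l.length).countP
        (fun k : Nat => (PySem.List.pyGetD l (k : Int) 0
            == PySem.List.pyGetD [1, 2, 3, 4, 5] (PySem.Int.mod (k : Int) 5) 0)) := by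
  apply List.countP_congr
  intro k _
  have hm : PySem.Int.mod (k : Int) 5 = ((k % 5 : Nat) : Int) := by
    exact_mod_cast PySem.Int.mod_natCast k 5
  simp only [hm, PySem.List.pyGetD_natCast]
  have hr : k % 5 < 5 := Nat.mod_lt _ (by norm_num)
  set r := k % 5 with hrdef
  clear_value r
  interval_cases r <;> norm_num [List.getD] <;> omega

-- person 2: A's even- and odd-position counts sum to B's single pattern count
theorem pv_cnt2 (l : List Int) :
    (List.range (l.length - l.length / 2)).countP
        (fun j : Nat => ((2 : Int) == PySem.List.pyGetD l (2 * (j : Int)) 0))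
      + (List.range (l.length / 2)).countP
        (fun j : Nat => (PySem.List.pyGetD [1, 3, 4, 5] (PySem.Int.mod (j : Int) 4) 0
            == PySem.List.pyGetD l (2 * (j : Int) + 1) 0))
      = (List.range l.length).countP
        (fun k : Nat => (PySem.List.pyGetD l (k : Int) 0
            == PySem.List.pyGetD [2, 1, 2, 3, 2, 4, 2, 5] (PySem.Int.mod (k : Int) 8) 0)) := by
  rw [pv_countP_range_split
    (fun k : Nat => (PySem.List.pyGetD l (k : Int) 0
        == PySem.List.pyGetD [2, 1, 2, 3, 2, 4, 2, 5] (PySem.Int.mod (k : Int) 8) 0)) l.length]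
  congr 1
  · apply List.countP_congr
    intro j _
    have e1 : 2 * (j : Int) = ((2 * j : Nat) : Int) := by push_cast; ring
    have hm : PySem.Int.mod ((2 * j : Nat) : Int) 8 = (((2 * j) % 8 : Nat) : Int) := by
      exact_mod_cast PySem.Int.mod_natCast (2 * j) 8
    have h8 : (2 * j) % 8 = 2 * (j % 4) := by omega
    simp only [e1, hm, h8, PySem.List.pyGetD_natCast]
    have hr : j % 4 < 4 := Nat.mod_lt _ (by norm_num)
    set r := j % 4 with hrdef
    clear_value r
    interval_cases r <;> norm_num [List.getD] <;> omega
  · apply List.countP_congr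
    intro j _
    have e1 : 2 * (j : Int) + 1 = ((2 * j + 1 : Nat) : Int) := by push_cast; ring
    have hm : PySem.Int.mod ((2 * j + 1 : Nat) : Int) 8 = (((2 * j + 1) % 8 : Nat) : Int) := by
      exact_mod_cast PySem.Int.mod_natCast (2 * j + 1) 8
    have hm4 : PySem.Int.mod ((j : Nat) : Int) 4 = ((j % 4 : Nat) : Int) := by
      exact_mod_cast PySem.Int.mod_natCast j 4
    have h8 : (2 * j + 1) % 8 = 2 * (j % 4) + 1 := by omega
    simp only [e1, hm, hm4, h8, PySem.List.pyGetD_natCast]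
    have hr : j % 4 < 4 := Nat.mod_lt _ (by norm_num)
    set r := j % 4 with hrdef
    clear_value r
    interval_cases r <;> norm_num [List.getD] <;> omega

-- person 3
theorem pv_cnt3 (l : List Int) :
    (List.range (l.length - l.length / 2)).countP
        (fun j : Nat => (PySem.List.pyGetD [3, 1, 2, 4, 5] (PySem.Int.mod (j : Int) 5) 0
            == PySem.List.pyGetD l (2 * (j : Int)) 0))
      + (List.range (l.length / 2)).countP
        (fun j : Nat => (PySem.List.pyGetD [3, 1, 2, 4, 5] (PySem.Int.mod (j : Int) 5) 0
            == PySem.List.pyGetD l (2 * (j : Int) + 1) 0))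
      = (List.range l.length).countP
        (fun k : Nat => (PySem.List.pyGetD l (k : Int) 0
            == PySem.List.pyGetD [3, 3, 1, 1, 2, 2, 4, 4, 5, 5] (PySem.Int.mod (k : Int) 10) 0)) := by
  rw [pv_countP_range_split
    (fun k : Nat => (PySem.List.pyGetD l (k : Int) 0
        == PySem.List.pyGetD [3, 3, 1, 1, 2, 2, 4, 4, 5, 5] (PySem.Int.mod (k : Int) 10) 0)) l.length]
  congr 1
  · apply List.countP_congr
    intro j _
    have e1 : 2 * (j : Int) = ((2 * j : Nat) : Int) := by push_cast; ring
    have hm : PySem.Int.mod ((2 * j : Nat) : Int) 10 = (((2 * j) % 10 : Nat) : Int) := by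
      exact_mod_cast PySem.Int.mod_natCast (2 * j) 10
    have hm5 : PySem.Int.mod ((j : Nat) : Int) 5 = ((j % 5 : Nat) : Int) := by
      exact_mod_cast PySem.Int.mod_natCast j 5
    have h10 : (2 * j) % 10 = 2 * (j % 5) := by omega
    simp only [e1, hm, hm5, h10, PySem.List.pyGetD_natCast]
    have hr : j % 5 < 5 := Nat.mod_lt _ (by norm_num)
    set r := j % 5 with hrdef
    clear_value r
    interval_cases r <;> norm_num [List.getD] <;> omega
  · apply List.countP_congr
    intro j _
    have e1 : 2 * (j : Int) + 1 = ((2 * j + 1 : Nat) : Int) := by push_cast; ring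
    have hm : PySem.Int.mod ((2 * j + 1 : Nat) : Int) 10 = (((2 * j + 1) % 10 : Nat) : Int) := by
      exact_mod_cast PySem.Int.mod_natCast (2 * j + 1) 10
    have hm5 : PySem.Int.mod ((j : Nat) : Int) 5 = ((j % 5 : Nat) : Int) := by
      exact_mod_cast PySem.Int.mod_natCast j 5
    have h10 : (2 * j + 1) % 10 = 2 * (j % 5) + 1 := by omega
    simp only [e1, hm, hm5, h10, PySem.List.pyGetD_natCast]
    have hr : j % 5 < 5 := Nat.mod_lt _ (by norm_num)
    set r := j % 5 with hrdef
    clear_value r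
    interval_cases r <;> norm_num [List.getD] <;> omega

-- A's running-max selection loop equals B's max-then-filter selection, for nonnegative scores
set_option maxHeartbeats 2000000 in
theorem pv_select (s1 s2 s3 : Int) (h1 : 0 ≤ s1) (h2 : 0 ≤ s2) (h3 : 0 ≤ s3) :
    (([1, 2, 3] : List Int).foldl (fun (p : List Int × Int) stNo =>
        if p.2 == PySem.List.pyGetD [0, s1, s2, s3] stNo 0 then (p.1 ++ [stNo], p.2)
        else if p.2 < PySem.List.pyGetD [0, s1, s2, s3] stNo 0
          then ([stNo], PySem.List.pyGetD [0, s1, s2, s3] stNo 0)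
        else p) ([], 0)).1
    = ([((1 : Int), s1), (2, s2), (3, s3)].filter (fun ks => ks.2 == max s1 (max s2 s3))).map
        (fun ks => ks.1) := by
  simp only [List.foldl, List.filter_cons, List.filter_nil, PySem.List.pyGetD_ofNat', List.getD,
    beq_iff_eq, List.getElem?_cons_zero, List.getElem?_cons_succ,
    Option.getD_some, List.nil_append]
  split_ifs <;> simp only [List.map_cons, List.map_nil] <;> first | rfl | (exfalso; omega)

-- ===== VERDICT (by name: the statement is the Claim_ definition above) =====
theorem solution_spec : Claim_equal_solution := by
  unfold Claim_equal_solution Spec_solution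
  intro answers _
  unfold solution solution_alt
  rw [PySem.List.enumerate_eq_map_pyRange answers 0,
    (show PySem.List.pyRange 1 4 1 = [1, 2, 3] by decide)]
  simp only [PySem.List.len_eq, PySem.List.pyRange_one, sub_zero, Int.toNat_natCast,
    List.foldl_map, zero_add]
  rw [pv_pyRange_even answers.length, pv_pyRange_odd answers.length]
  simp only [List.foldl_map]
  rw [pv_counter_fold (fun oi no => (PySem.List.pyGetD [1, 3, 4, 5] (PySem.Int.mod oi 4) 0
        == PySem.List.pyGetD answers no 0)) (fun k : Nat => 2 * (k : Int) + 1),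
    pv_counter_fold (fun oi no => (PySem.List.pyGetD [3, 1, 2, 4, 5] (PySem.Int.mod oi 5) 0
        == PySem.List.pyGetD answers no 0)) (fun k : Nat => 2 * (k : Int)),
    pv_counter_fold (fun oi no => (PySem.List.pyGetD [3, 1, 2, 4, 5] (PySem.Int.mod oi 5) 0
        == PySem.List.pyGetD answers no 0)) (fun k : Nat => 2 * (k : Int) + 1)]
  simp only [PySem.List.foldl_prod_mk
      (f := fun (acc : Int) (y : Nat) =>
        if (PySem.List.pyGetD answers (y : Int) 0
            == PySem.List.pyGetD [1, 2, 3, 4, 5] (PySem.Int.mod (y : Int) 5) 0) then acc + 1 else acc)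
      (g := fun (acc : Int × Int) (y : Nat) =>
        ((if (PySem.List.pyGetD answers (y : Int) 0
            == PySem.List.pyGetD [2, 1, 2, 3, 2, 4, 2, 5] (PySem.Int.mod (y : Int) 8) 0)
          then acc.1 + 1 else acc.1),
         (if (PySem.List.pyGetD answers (y : Int) 0
            == PySem.List.pyGetD [3, 3, 1, 1, 2, 2, 4, 4, 5, 5] (PySem.Int.mod (y : Int) 10) 0)
          then acc.2 + 1 else acc.2)))]
  simp only [PySem.List.foldl_prod_mk
      (f := fun (acc : Int) (y : Nat) =>
        if (PySem.List.pyGetD answers (y : Int) 0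
            == PySem.List.pyGetD [2, 1, 2, 3, 2, 4, 2, 5] (PySem.Int.mod (y : Int) 8) 0)
          then acc + 1 else acc)
      (g := fun (acc : Int) (y : Nat) =>
        if (PySem.List.pyGetD answers (y : Int) 0
            == PySem.List.pyGetD [3, 3, 1, 1, 2, 2, 4, 4, 5, 5] (PySem.Int.mod (y : Int) 10) 0)
          then acc + 1 else acc)]
  simp only [PySem.List.foldl_if_add_one, zero_add]
  rw [pv_cnt1 answers]
  simp only [← Nat.cast_add]
  rw [pv_cnt2 answers, pv_cnt3 answers]
  exact pv_select _ _ _ (Int.natCast_nonneg _) (Int.natCast_nonneg _) (Int.natCast_nonneg _)
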